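-- pv_equiv track=rewrite | github.com/aorursy/KT_dataset_py | jeffster_group8.py | predict_Selected_text
-- ===== SOURCE A (Python) =====
-- import string
--
-- def predict_Selected_text(clean_text,ori_text,voca):
--
--     tweet = clean_text
--
--     words = tweet.split()
--
--     words_len = len(words)
--
--     subsets = [words[i:j+1] for i in range(words_len) for j in range(i,words_len)]
--
--
--
--     score = 0
--
--     selection_str = '' # This will be our choice
--
--     lst = sorted(subsets, key = len) # Sort candidates by length
--
--
--
--
--
--     for i in range(len(subsets)):
--
--
--
--         new_sum = 0 # Sum for the current substring
--
--
--
--         # Calculate the sum of weights for each word in the substring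
--
--         for p in range(len(lst[i])):
--
--             if(lst[i][p].translate(str.maketrans('','',string.punctuation)) in voca.keys()):
--
--                 new_sum += voca[lst[i][p].translate(str.maketrans('','',string.punctuation))]
--
--
--
--         # If the sum is greater than the score, update our current selection
--
--         if(new_sum > score):
--
--             score = new_sum
--
--             selection_str = lst[i]
--
--             #tol = tol*5 # Increase the tolerance a bit each time we choose a selection
--
--
--
--     # If we didn't find good substrings, return the whole text
--
--     if(len(selection_str) == 0):
--
--         selection_str = words
--
--
--
--     return ' '.join(selection_str)
-- ===== SOURCE B (Python) =====
-- import string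
--
-- def predict_Selected_text(clean_text, ori_text, voca):
--     words = clean_text.split()
--     n = len(words)
--     tbl = str.maketrans('', '', string.punctuation)
--     # per-word weight, computed once
--     w = [voca.get(word.translate(tbl), 0) for word in words]
--     # prefix sums: sum of w[:k]
--     prefix = [0]
--     for x in w:
--         prefix.append(prefix[-1] + x)
--     best_score = 0
--     best = None  # (start, length)
--     for L in range(1, n + 1):
--         for s in range(n - L + 1):
--             total = prefix[s + L] - prefix[s]
--             if total > best_score:
--                 best_score = total
--                 best = (s, L)
--     if best is None:
--         return ' '.join(words)
--     s, L = best
--     return ' '.join(words[s:s + L])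
-- ===== Notes on version B (the rewrite author's own statement) =====
-- stated objective: faster
-- what changed: A enumerates all O(n^2) word substrings, sorts them by length and re-sums each one word by word; B computes each word's vocabulary weight once, builds prefix sums, and scans (length, start) pairs in the same order evaluating each substring sum in O(1).
import Mathlib
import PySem

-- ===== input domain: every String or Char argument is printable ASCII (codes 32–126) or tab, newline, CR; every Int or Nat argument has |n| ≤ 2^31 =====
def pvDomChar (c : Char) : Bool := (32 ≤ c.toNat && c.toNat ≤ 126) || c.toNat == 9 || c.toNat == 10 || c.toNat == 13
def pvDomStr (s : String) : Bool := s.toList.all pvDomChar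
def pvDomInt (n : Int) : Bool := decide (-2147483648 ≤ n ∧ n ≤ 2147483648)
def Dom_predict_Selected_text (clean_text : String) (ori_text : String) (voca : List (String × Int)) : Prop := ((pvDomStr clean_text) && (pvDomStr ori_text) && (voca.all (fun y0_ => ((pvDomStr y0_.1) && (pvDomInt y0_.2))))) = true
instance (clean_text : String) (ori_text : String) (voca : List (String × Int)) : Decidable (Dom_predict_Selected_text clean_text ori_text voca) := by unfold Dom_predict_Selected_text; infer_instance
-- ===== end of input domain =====

-- B replaces A's "enumerate all substrings, sort them by length, re-sum each one word by word"
-- with per-word weights computed once plus prefix sums, scanning (length, start) pairs in the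
-- same order; objective: faster.

-- ===== PORT A =====
-- s.translate(str.maketrans('', '', string.punctuation)): drop exactly the 32 ASCII punctuation chars (exact)
def pvStripPunct (s : String) : String :=
  String.ofList (s.toList.filter (fun c => !("!\"#$%&'()*+,-./:;<=>?@[\\]^_`{|}~".toList.contains c)))

def predict_Selected_text (clean_text : String) (ori_text : String) (voca : List (String × Int)) : String :=
  let tweet := clean_text
  let words := PySem.Str.split₀ tweet
  let words_len : Int := words.length
  let subsets := (PySem.List.pyRange 0 words_len).flatMap (fun i =>
      (PySem.List.pyRange i words_len).map (fun j => PySem.List.slice words (some i) (some (j + 1))))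
  let lst := PySem.List.sorted subsets (fun l => l.length)
  let st := (PySem.List.pyRange 0 (subsets.length : Int)).foldl (fun (st : Int × List String) i =>
      let lsti := PySem.List.pyGetD lst i []
      let new_sum := (PySem.List.pyRange 0 (lsti.length : Int)).foldl (fun (acc : Int) p =>
          let wrd := pvStripPunct (PySem.List.pyGetD lsti p "")
          if (voca.map (·.1)).contains wrd then
            acc + ((voca.find? (fun kv => kv.1 == wrd)).map (·.2)).getD 0
          else acc) 0
      if new_sum > st.1 then (new_sum, lsti) else st) (0, [])
  let selection_str := if st.2.length = 0 then words else st.2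
  PySem.Str.join " " selection_str

-- ===== PORT B =====
-- voca.get(word.translate(tbl), 0): first-match lookup in the association list, default 0
def pvWordWeight (voca : List (String × Int)) (word : String) : Int :=
  ((voca.find? (fun kv => kv.1 == pvStripPunct word)).map (·.2)).getD 0

def predict_Selected_text_alt (clean_text : String) (ori_text : String) (voca : List (String × Int)) : String :=
  let words := PySem.Str.split₀ clean_text
  let n : Int := words.length
  let w := words.map (pvWordWeight voca)
  let pref := w.foldl (fun pre x => pre ++ [PySem.List.pyGetD pre (-1) 0 + x]) [(0 : Int)]
  let st := (PySem.List.pyRange 1 (n + 1)).foldl (fun (st : Int × Option (Int × Int)) L =>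
      (PySem.List.pyRange 0 (n - L + 1)).foldl (fun st s =>
        let total := PySem.List.pyGetD pref (s + L) 0 - PySem.List.pyGetD pref s 0
        if total > st.1 then (total, some (s, L)) else st) st) ((0 : Int), none)
  match st.2 with
  | none => PySem.Str.join " " words
  | some (s, L) => PySem.Str.join " " (PySem.List.slice words (some s) (some (s + L)))

-- ===== PRECONDITION & SPEC =====
def Spec_predict_Selected_text (clean_text : String) (ori_text : String) (voca : List (String × Int)) (out : String) : Prop := out = predict_Selected_text_alt clean_text ori_text voca
instance (clean_text : String) (ori_text : String) (voca : List (String × Int)) (out : String) : Decidable (Spec_predict_Selected_text clean_text ori_text voca out) := by unfold Spec_predict_Selected_text; infer_instance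

-- ===== CLAIM (what is proved, stated in full; the proofs are below) =====
def Claim_equal_predict_Selected_text : Prop := ∀ (clean_text : String) (ori_text : String) (voca : List (String × Int)), Dom_predict_Selected_text clean_text ori_text voca → Spec_predict_Selected_text clean_text ori_text voca (predict_Selected_text clean_text ori_text voca)

-- ===== LEMMAS AND PROOFS =====

-- words[s:s+L]
def pvSub (words : List String) (s L : Nat) : List String := (words.drop s).take L

-- A's substrings in pre-sort order: start ascending, then length ascending
def pvSubsA (words : List String) : List (List String) :=
  (List.range words.length).flatMap (fun i =>
    (List.range (words.length - i)).map (fun t => pvSub words i (t + 1)))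

-- the (start, length) pairs grouped by length ascending, start ascending inside a group
def pvIdxs (n : Nat) : List (Nat × Nat) :=
  (List.range n).flatMap (fun Lm1 => (List.range (n - Lm1)).map (fun s => (s, Lm1 + 1)))

-- total weight of a substring
def pvMsum (voca : List (String × Int)) (sub : List String) : Int :=
  (sub.map (pvWordWeight voca)).sum

def pvAmodel (words : List String) (voca : List (String × Int)) : Int × List String :=
  (pvIdxs words.length).foldl (fun st p =>
    if pvMsum voca (pvSub words p.1 p.2) > st.1 then (pvMsum voca (pvSub words p.1 p.2), pvSub words p.1 p.2) else st) (0, [])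

def pvTot (w : List Int) (p : Nat × Nat) : Int := (w.take (p.1 + p.2)).sum - (w.take p.1).sum

def pvBmodel (words : List String) (voca : List (String × Int)) : Int × Option (Int × Int) :=
  (pvIdxs words.length).foldl (fun st p =>
    if pvTot (words.map (pvWordWeight voca)) p > st.1 then
      (pvTot (words.map (pvWordWeight voca)) p, some ((p.1 : Int), (p.2 : Int))) else st) (0, none)

theorem pvLength_sub (words : List String) (s L : Nat) (h : s + L ≤ words.length) :
    (pvSub words s L).length = L := by
  simp [pvSub]; omega

theorem pvFlatMapCongr {α β : Type} (l : List α) (f g : α → List β)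
    (h : ∀ a ∈ l, f a = g a) : l.flatMap f = l.flatMap g := by
  induction l with
  | nil => rfl
  | cons a t ih => simp [List.flatMap_cons, h a (by simp), ih (fun a ha => h a (by simp [ha]))]

theorem pvInsertBy_middle {α : Type} (key : α → Nat) (x : α) (P S : List α)
    (hP : ∀ y ∈ P, ¬ key x < key y) (hS : ∀ y ∈ S, key x < key y) :
    PySem.List.insertBy (fun a b => decide (key a < key b)) x (P ++ S) = P ++ x :: S := by
  induction P with
  | nil =>
    cases S with
    | nil => simp [PySem.List.insertBy]
    | cons s S' => simp [PySem.List.insertBy, hS s (by simp)]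
  | cons p P' ih =>
    have h1 : ¬ key x < key p := hP p (by simp)
    simp [PySem.List.insertBy, h1, ih (fun y hy => hP y (by simp [hy]))]

-- stable sort = concatenation of the filter groups, one group per key, keys ascending
theorem pvStableSortGroups {α : Type} (key : α → Nat) (ks : List Nat) (hks : ks.Pairwise (· < ·)) :
    ∀ (xs : List α), (∀ x ∈ xs, key x ∈ ks) →
      PySem.List.sorted xs key = ks.flatMap (fun k => xs.filter (fun x => key x = k)) := by
  intro xs
  induction xs using List.reverseRecOn with
  | nil =>
    intro _
    rw [PySem.List.sorted_eq_foldl_insertBy]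
    simp
  | append_singleton ys x ih =>
    intro hcov
    have hys := ih (fun y hy => hcov y (List.mem_append_left _ hy))
    have hkx : key x ∈ ks := hcov x (by simp)
    obtain ⟨ks₁, ks₂, rfl⟩ := List.append_of_mem hkx
    have hlt₁ : ∀ k ∈ ks₁, k < key x := by
      intro k hk
      exact (List.pairwise_append.mp hks).2.2 k hk (key x) (by simp)
    have hlt₂ : ∀ k ∈ ks₂, key x < k :=
      (List.pairwise_cons.mp (List.pairwise_append.mp hks).2.1).1
    set F := fun k => ys.filter (fun y => key y = k) with hF
    have hG : ∀ k, (ys ++ [x]).filter (fun y => key y = k)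
        = F k ++ (if key x = k then [x] else []) := by
      intro k
      by_cases h : key x = k <;> simp [List.filter_append, hF, h]
    have hP : ∀ y ∈ ks₁.flatMap F ++ F (key x), ¬ key x < key y := by
      intro y hy
      rcases List.mem_append.mp hy with hy1 | hy2
      · obtain ⟨k, hk, hyk⟩ := List.mem_flatMap.mp hy1
        have h1 : key y = k := by simpa using (List.mem_filter.mp hyk).2
        have h2 := hlt₁ k hk
        omega
      · have h1 : key y = key x := by simpa using (List.mem_filter.mp hy2).2
        omega
    have hS : ∀ y ∈ ks₂.flatMap F, key x < key y := by
      intro y hy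
      obtain ⟨k, hk, hyk⟩ := List.mem_flatMap.mp hy
      have h1 : key y = k := by simpa using (List.mem_filter.mp hyk).2
      have h2 := hlt₂ k hk
      omega
    have hflat : (ks₁ ++ key x :: ks₂).flatMap F
        = (ks₁.flatMap F ++ F (key x)) ++ ks₂.flatMap F := by
      simp [List.flatMap_append, List.flatMap_cons, List.append_assoc]
    rw [PySem.List.sorted_eq_foldl_insertBy, List.foldl_append, List.foldl_cons, List.foldl_nil,
        ← PySem.List.sorted_eq_foldl_insertBy, hys, hflat,
        pvInsertBy_middle key x _ _ hP hS]
    have hks1 : ks₁.flatMap (fun k => (ys ++ [x]).filter (fun y => key y = k)) = ks₁.flatMap F :=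
      pvFlatMapCongr _ _ _ (fun k hk => by rw [hG k, if_neg (Nat.ne_of_gt (hlt₁ k hk))]; simp)
    have hks2 : ks₂.flatMap (fun k => (ys ++ [x]).filter (fun y => key y = k)) = ks₂.flatMap F :=
      pvFlatMapCongr _ _ _ (fun k hk => by rw [hG k, if_neg (Nat.ne_of_lt (hlt₂ k hk))]; simp)
    rw [List.flatMap_append, List.flatMap_cons, hks1, hks2, hG (key x), if_pos rfl]
    simp [List.append_assoc]

theorem pvRangeFilterEq (m c : Nat) :
    (List.range m).filter (fun t => t = c) = if c < m then [c] else [] := by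
  induction m with
  | zero => simp
  | succ m ih =>
    rw [List.range_succ, List.filter_append, ih]
    by_cases h : c < m
    · simp [h, Nat.lt_succ_of_lt h, Nat.ne_of_gt h]
    · by_cases h2 : m = c
      · subst h2; simp
      · have : ¬ c < m + 1 := by omega
        simp [h, h2, this]

theorem pvFlatMapRangeIf {β : Type} (f : Nat → β) (m n : Nat) (h : m ≤ n) :
    (List.range n).flatMap (fun i => if i < m then [f i] else []) = (List.range m).map f := by
  induction n with
  | zero =>
    have : m = 0 := by omega
    subst this; simp
  | succ n ih =>
    rw [List.range_succ, List.flatMap_append, List.flatMap_singleton]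
    by_cases hm : m ≤ n
    · rw [ih hm]
      have : ¬ n < m := by omega
      simp [this]
    · have hm1 : m = n + 1 := by omega
      subst hm1
      rw [pvFlatMapCongr _ _ (fun i => [f i]) (by intro a ha; simp at ha; simp [Nat.lt_succ_of_lt ha])]
      have h1 : (List.range n).flatMap (fun i => [f i]) = (List.range n).map f := by
        induction (List.range n) with
        | nil => rfl
        | cons a t iht => simp [List.flatMap_cons, iht]
      rw [h1, List.range_succ, List.map_append]
      simp

-- sorting A's substring list by length yields the length-grouped enumeration
theorem pvSortedSubs (words : List String) :
    PySem.List.sorted (pvSubsA words) (fun l => l.length)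
      = (pvIdxs words.length).map (fun p => pvSub words p.1 p.2) := by
  set n := words.length with hn
  have hks : ((List.range n).map (· + 1)).Pairwise (· < ·) :=
    List.Pairwise.map _ (by intro a b h; omega) List.pairwise_lt_range
  have hcov : ∀ x ∈ pvSubsA words, x.length ∈ (List.range n).map (· + 1) := by
    intro x hx
    simp only [pvSubsA, List.mem_flatMap, List.mem_map, List.mem_range, ← hn] at hx
    obtain ⟨i, hi, t, ht, rfl⟩ := hx
    rw [pvLength_sub words i (t + 1) (by omega)]
    simp only [List.mem_map, List.mem_range]
    exact ⟨t, by omega, rfl⟩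
  rw [pvStableSortGroups _ _ hks _ hcov, List.flatMap_map]
  have hgrp : ∀ Lm1 ∈ List.range n, (pvSubsA words).filter (fun x => x.length = Lm1 + 1)
      = (List.range (n - Lm1)).map (fun s => pvSub words s (Lm1 + 1)) := by
    intro Lm1 hLm
    have hL : Lm1 < n := List.mem_range.mp hLm
    rw [pvSubsA, List.filter_flatMap, ← hn]
    have inner : ∀ i ∈ List.range n,
        ((List.range (n - i)).map (fun t => pvSub words i (t + 1))).filter
            (fun x => x.length = Lm1 + 1)
          = if i < n - Lm1 then [pvSub words i (Lm1 + 1)] else [] := by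
      intro i hi
      have hi' : i < n := List.mem_range.mp hi
      rw [List.filter_map]
      have hfc : (List.range (n - i)).filter
            ((fun (x : List String) => decide (x.length = Lm1 + 1)) ∘ (fun t => pvSub words i (t + 1)))
          = (List.range (n - i)).filter (fun t => t = Lm1) := by
        apply List.filter_congr
        intro t ht
        have ht' : t < n - i := List.mem_range.mp ht
        simp only [Function.comp_apply, pvLength_sub words i (t + 1) (by omega)]
        by_cases h : t = Lm1
        · simp [h]
        · simp [h]
      rw [hfc, pvRangeFilterEq]
      by_cases hc : Lm1 < n - i
      · have hc2 : i < n - Lm1 := by omega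
        simp [hc, hc2]
      · have hc2 : ¬ i < n - Lm1 := by omega
        simp [hc, hc2]
    rw [pvFlatMapCongr _ _ _ inner, pvFlatMapRangeIf _ (n - Lm1) n (by omega)]
  rw [pvFlatMapCongr _ _ _ hgrp, pvIdxs, List.map_flatMap]
  apply pvFlatMapCongr
  intro Lm1 _
  simp [List.map_map, Function.comp]

theorem pvFoldlRel {α β γ : Type} (R : β → γ → Prop) (f : β → α → β) (g : γ → α → γ) :
    ∀ (l : List α) (b : β) (c : γ), R b c →
      (∀ a ∈ l, ∀ b c, R b c → R (f b a) (g c a)) → R (l.foldl f b) (l.foldl g c) := by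
  intro l
  induction l with
  | nil => intro b c h _; exact h
  | cons a t ih =>
    intro b c h hstep
    exact ih _ _ (hstep a (by simp) b c h) (fun a' ha' => hstep a' (by simp [ha']))

theorem pvPrefEq (w : List Int) :
    w.foldl (fun pre x => pre ++ [PySem.List.pyGetD pre (-1) 0 + x]) [(0 : Int)]
      = (List.range (w.length + 1)).map (fun k => (w.take k).sum) := by
  induction w using List.reverseRecOn with
  | nil => simp
  | append_singleton v x ih =>
    rw [List.foldl_append, List.foldl_cons, List.foldl_nil, ih]
    have hsplit : (List.range (v.length + 1)).map (fun k => (v.take k).sum)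
        = (List.range v.length).map (fun k => (v.take k).sum) ++ [v.sum] := by
      rw [List.range_succ, List.map_append]
      simp
    rw [hsplit, PySem.List.pyGetD_neg_one_append_singleton]
    have hlen : (v ++ [x]).length + 1 = (v.length + 1) + 1 := by simp
    rw [hlen, List.range_succ (n := v.length + 1), List.map_append]
    congr 1
    · rw [List.range_succ, List.map_append]
      congr 1
      · apply List.map_congr_left
        intro k hk
        have hk' : k < v.length := List.mem_range.mp hk
        rw [List.take_append_of_le_length (by omega)]
      · simp [List.take_append_of_le_length (le_refl v.length)]
    · have : (v ++ [x]).take (v.length + 1) = v ++ [x] := by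
        apply List.take_of_length_le
        simp
      simp [this]

theorem pvStepFun (voca : List (String × Int)) :
    (fun (acc : Int) (wrd0 : String) =>
      if (voca.map (·.1)).contains (pvStripPunct wrd0) then
        acc + ((voca.find? (fun kv => kv.1 == pvStripPunct wrd0)).map (·.2)).getD 0
      else acc) = fun (acc : Int) (wrd0 : String) => acc + pvWordWeight voca wrd0 := by
  funext acc wrd0
  by_cases h : (voca.map (·.1)).contains (pvStripPunct wrd0)
  · rw [if_pos h]
    rfl
  · rw [if_neg h]
    have hnone : voca.find? (fun kv => kv.1 == pvStripPunct wrd0) = none := by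
      rw [List.find?_eq_none]
      intro kv hkv
      intro hc
      have he : kv.1 = pvStripPunct wrd0 := by simpa using hc
      apply h
      simp only [List.contains_eq_any_beq, List.any_map, List.any_eq_true]
      exact ⟨kv, hkv, by simp [Function.comp, he]⟩
    rw [pvWordWeight, hnone]
    simp


theorem pvSubsetsEq (words : List String) :
    (PySem.List.pyRange 0 ((words.length : Nat) : Int)).flatMap (fun i =>
        (PySem.List.pyRange i ((words.length : Nat) : Int)).map (fun j =>
          PySem.List.slice words (some i) (some (j + 1))))
      = pvSubsA words := by
  set n := words.length with hn
  rw [PySem.List.pyRange_one]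
  have h0 : (((n : Int)) - 0).toNat = n := by omega
  rw [h0, List.flatMap_map, pvSubsA, ← hn]
  apply pvFlatMapCongr
  intro i hi
  have hi' : i < n := List.mem_range.mp hi
  have hz : ((0 : Int) + (i : Int)) = ((i : Nat) : Int) := by ring
  rw [hz, PySem.List.pyRange_one]
  have h1 : (((n : Int)) - (i : Int)).toNat = n - i := by omega
  rw [h1, List.map_map]
  apply List.map_congr_left
  intro t ht
  have ht' : t < n - i := List.mem_range.mp ht
  simp only [Function.comp_apply]
  have e1 : ((i : Int) + (t : Int) + 1) = ((i : Int) + ((t + 1 : Nat) : Int)) := by push_cast; ring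
  rw [e1, PySem.List.slice_natCast_add]
  rfl


theorem pvAeq (clean_text ori_text : String) (voca : List (String × Int)) :
    predict_Selected_text clean_text ori_text voca
      = (let words := PySem.Str.split₀ clean_text
         let st := pvAmodel words voca
         PySem.Str.join " " (if st.2.length = 0 then words else st.2)) := by
  simp only [predict_Selected_text]
  set words := PySem.Str.split₀ clean_text with hw
  rw [pvSubsetsEq, pvSortedSubs]
  have hlen : (pvSubsA words).length = ((pvIdxs words.length).map (fun p => pvSub words p.1 p.2)).length := by
    rw [← pvSortedSubs, PySem.List.length_sorted]
  rw [hlen]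
  rw [PySem.List.foldl_pyRange_zero_pyGetD' ((pvIdxs words.length).map (fun p => pvSub words p.1 p.2)) []
      (fun (st : Int × List String) (lsti : List String) =>
        if (PySem.List.pyRange 0 (lsti.length : Int)).foldl (fun (acc : Int) p =>
            if (voca.map (·.1)).contains (pvStripPunct (PySem.List.pyGetD lsti p "")) then
              acc + ((voca.find? (fun kv => kv.1 == pvStripPunct (PySem.List.pyGetD lsti p ""))).map (·.2)).getD 0
            else acc) 0 > st.1 then
          ((PySem.List.pyRange 0 (lsti.length : Int)).foldl (fun (acc : Int) p =>
            if (voca.map (·.1)).contains (pvStripPunct (PySem.List.pyGetD lsti p "")) then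
              acc + ((voca.find? (fun kv => kv.1 == pvStripPunct (PySem.List.pyGetD lsti p ""))).map (·.2)).getD 0
            else acc) 0, lsti)
        else st) ((0 : Int), ([] : List String))]
  rw [List.foldl_map]
  have hfold : (pvIdxs words.length).foldl (fun (st : Int × List String) p =>
        if (PySem.List.pyRange 0 ((pvSub words p.1 p.2).length : Int)).foldl (fun (acc : Int) q =>
            if (voca.map (·.1)).contains (pvStripPunct (PySem.List.pyGetD (pvSub words p.1 p.2) q "")) then
              acc + ((voca.find? (fun kv => kv.1 == pvStripPunct (PySem.List.pyGetD (pvSub words p.1 p.2) q ""))).map (·.2)).getD 0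
            else acc) 0 > st.1 then
          ((PySem.List.pyRange 0 ((pvSub words p.1 p.2).length : Int)).foldl (fun (acc : Int) q =>
            if (voca.map (·.1)).contains (pvStripPunct (PySem.List.pyGetD (pvSub words p.1 p.2) q "")) then
              acc + ((voca.find? (fun kv => kv.1 == pvStripPunct (PySem.List.pyGetD (pvSub words p.1 p.2) q ""))).map (·.2)).getD 0
            else acc) 0, pvSub words p.1 p.2)
        else st) ((0 : Int), ([] : List String))
      = pvAmodel words voca := by
    rw [pvAmodel]
    refine PySem.List.foldl_congr_mem _ _ _ _ ?_
    intro st p hp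
    rw [PySem.List.foldl_pyRange_zero_pyGetD' (pvSub words p.1 p.2) ""
        (fun (acc : Int) (wrd0 : String) =>
          if (voca.map (·.1)).contains (pvStripPunct wrd0) then
            acc + ((voca.find? (fun kv => kv.1 == pvStripPunct wrd0)).map (·.2)).getD 0
          else acc) 0]
    rw [pvStepFun voca, PySem.List.foldl_add, zero_add]
    rfl
  rw [hfold]

theorem pvBeq (clean_text ori_text : String) (voca : List (String × Int)) :
    predict_Selected_text_alt clean_text ori_text voca
      = (let words := PySem.Str.split₀ clean_text
         let st := pvBmodel words voca
         match st.2 with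
         | none => PySem.Str.join " " words
         | some (s, L) => PySem.Str.join " " (PySem.List.slice words (some s) (some (s + L)))) := by
  simp only [predict_Selected_text_alt]
  set words := PySem.Str.split₀ clean_text with hw
  set n := words.length with hn
  have hwl : (words.map (pvWordWeight voca)).length = n := by simp [hn]
  rw [pvPrefEq, hwl]
  have h1 : PySem.List.pyRange 1 ((n : Int) + 1) = (List.range n).map (fun (k : Nat) => (1 : Int) + (k : Int)) := by
    have ht : ((n : Int) + 1 - 1).toNat = n := by omega
    rw [PySem.List.pyRange_one, ht]
  rw [h1, List.foldl_map]
  have hstep : ∀ (st : Int × Option (Int × Int)), ∀ k ∈ List.range n,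
      (PySem.List.pyRange 0 ((n : Int) - (1 + (k : Int)) + 1)).foldl (fun st s =>
        if PySem.List.pyGetD ((List.range (n + 1)).map (fun k => ((words.map (pvWordWeight voca)).take k).sum)) (s + (1 + (k : Int))) 0
            - PySem.List.pyGetD ((List.range (n + 1)).map (fun k => ((words.map (pvWordWeight voca)).take k).sum)) s 0 > st.1 then
          (PySem.List.pyGetD ((List.range (n + 1)).map (fun k => ((words.map (pvWordWeight voca)).take k).sum)) (s + (1 + (k : Int))) 0
            - PySem.List.pyGetD ((List.range (n + 1)).map (fun k => ((words.map (pvWordWeight voca)).take k).sum)) s 0, some (s, 1 + (k : Int)))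
        else st) st
      = ((List.range (n - k)).map (fun s => (s, k + 1))).foldl (fun st p =>
          if pvTot (words.map (pvWordWeight voca)) p > st.1 then
            (pvTot (words.map (pvWordWeight voca)) p, some ((p.1 : Int), (p.2 : Int))) else st) st := by
    intro st k hk
    have hk' : k < n := List.mem_range.mp hk
    have h2 : PySem.List.pyRange 0 ((n : Int) - (1 + (k : Int)) + 1)
        = (List.range (n - k)).map (fun s => ((s : Nat) : Int)) := by
      rw [PySem.List.pyRange_one]
      have ht : (((n : Int) - (1 + (k : Int)) + 1) - 0).toNat = n - k := by omega
      rw [ht]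
      simp
    rw [h2, List.foldl_map, List.foldl_map]
    apply PySem.List.foldl_congr_mem
    intro st' s hs
    have hs' : s < n - k := List.mem_range.mp hs
    have e1 : ((s : Int) + (1 + (k : Int))) = ((s + (k + 1) : Nat) : Int) := by push_cast; ring
    have e2 : ((1 : Int) + (k : Int)) = ((k + 1 : Nat) : Int) := by push_cast; ring
    rw [e1, PySem.List.pyGetD_natCast, PySem.List.pyGetD_natCast,
        PySem.List.getD_map_range _ _ _ _ (by omega : s + (k + 1) < n + 1),
        PySem.List.getD_map_range _ _ _ _ (by omega : s < n + 1), e2]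
    rfl
  rw [PySem.List.foldl_congr_mem _ _ _ _ hstep]
  have hfold : pvBmodel words voca
      = (List.range n).foldl (fun acc k =>
          ((List.range (n - k)).map (fun s => (s, k + 1))).foldl (fun st p =>
            if pvTot (words.map (pvWordWeight voca)) p > st.1 then
              (pvTot (words.map (pvWordWeight voca)) p, some ((p.1 : Int), (p.2 : Int))) else st) acc) (0, none) := by
    rw [pvBmodel, ← hn, pvIdxs, List.foldl_flatMap]
  rw [← hfold]

theorem pvModelsAgree (words : List String) (voca : List (String × Int)) :
    PySem.Str.join " " (if (pvAmodel words voca).2.length = 0 then words else (pvAmodel words voca).2)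
      = (match (pvBmodel words voca).2 with
         | none => PySem.Str.join " " words
         | some (s, L) => PySem.Str.join " " (PySem.List.slice words (some s) (some (s + L)))) := by
  set n := words.length with hn
  have hmem : ∀ p ∈ pvIdxs n, 1 ≤ p.2 ∧ p.1 + p.2 ≤ n := by
    intro p hp
    simp only [pvIdxs, List.mem_flatMap, List.mem_map, List.mem_range] at hp
    obtain ⟨Lm1, hL, s, hs, rfl⟩ := hp
    simp; omega
  have hsum : ∀ p : Nat × Nat, p.1 + p.2 ≤ n →
      pvMsum voca (pvSub words p.1 p.2) = pvTot (words.map (pvWordWeight voca)) p := by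
    intro p hp
    have htk : (words.map (pvWordWeight voca)).take (p.1 + p.2)
        = (words.map (pvWordWeight voca)).take p.1
          ++ ((words.map (pvWordWeight voca)).drop p.1).take p.2 := List.take_add
    simp only [pvMsum, pvTot, pvSub, htk, List.sum_append, List.map_take, List.map_drop]
    ring
  have hR : (pvAmodel words voca).1 = (pvBmodel words voca).1 ∧
      (((pvBmodel words voca).2 = none ∧ (pvAmodel words voca).2 = []) ∨
        ∃ s L : Nat, 1 ≤ L ∧ s + L ≤ n ∧ (pvBmodel words voca).2 = some ((s : Int), (L : Int)) ∧
          (pvAmodel words voca).2 = pvSub words s L) := by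
    unfold pvAmodel pvBmodel
    rw [← hn]
    apply pvFoldlRel (fun (a : Int × List String) (b : Int × Option (Int × Int)) => a.1 = b.1 ∧
        ((b.2 = none ∧ a.2 = []) ∨
          ∃ s L : Nat, 1 ≤ L ∧ s + L ≤ n ∧ b.2 = some ((s : Int), (L : Int)) ∧ a.2 = pvSub words s L))
      _ _ (pvIdxs n) _ _ ⟨rfl, Or.inl ⟨rfl, rfl⟩⟩
    intro p hp a b hab
    obtain ⟨h1, h2⟩ := hab
    have hb := hmem p hp
    rw [hsum p hb.2, h1]
    by_cases hc : pvTot (words.map (pvWordWeight voca)) p > b.1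
    · rw [if_pos hc, if_pos hc]
      exact ⟨rfl, Or.inr ⟨p.1, p.2, hb.1, hb.2, rfl, rfl⟩⟩
    · rw [if_neg hc, if_neg hc]
      exact ⟨h1, h2⟩
  obtain ⟨h1, h2⟩ := hR
  rcases h2 with ⟨hbnone, hanil⟩ | ⟨s, L, hL, hsl, hbsome, hasub⟩
  · rw [hanil, hbnone]
    simp
  · rw [hasub, hbsome]
    have hlen : (pvSub words s L).length = L := pvLength_sub _ _ _ hsl
    rw [if_neg (by omega : ¬ (pvSub words s L).length = 0)]
    have hslice : PySem.List.slice words (some (s : Int)) (some ((s : Int) + (L : Int)))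
        = pvSub words s L := PySem.List.slice_natCast_add words s L
    simp only [hslice]

-- ===== VERDICT (by name: the statement is the Claim_ definition above) =====
theorem predict_Selected_text_spec : Claim_equal_predict_Selected_text := by
  intro clean_text ori_text voca _
  show _ = _
  rw [pvAeq, pvBeq]
  exact pvModelsAgree (PySem.Str.split₀ clean_text) voca
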